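-- pv_equiv track=rewrite | github.com/gboned/Refactorizar | yatzy.py | largeStraight
-- ===== SOURCE A (Python) =====
-- def largeStraight(*dice):
--     num = []
--     i = 2
--     for d in range(0, len(dice) + 1):
--         if i in dice and i <= 6:
--             num.append(i)
--             i = i + 1
--         elif len(num) < 5:
--             return 0
--     return sum(num)
-- ===== SOURCE B (Python) =====
-- def largeStraight(*dice):
--     return 20 if all(n in dice for n in (2, 3, 4, 5, 6)) else 0
-- ===== Notes on version B (the rewrite author's own statement) =====
-- stated objective: simpler
-- what changed: Replaced A's fuel-bounded loop with mutable counter, accumulator list and early return by a direct closed-form membership test: 20 if all of 2..6 occur in dice, else 0.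
import Mathlib
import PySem

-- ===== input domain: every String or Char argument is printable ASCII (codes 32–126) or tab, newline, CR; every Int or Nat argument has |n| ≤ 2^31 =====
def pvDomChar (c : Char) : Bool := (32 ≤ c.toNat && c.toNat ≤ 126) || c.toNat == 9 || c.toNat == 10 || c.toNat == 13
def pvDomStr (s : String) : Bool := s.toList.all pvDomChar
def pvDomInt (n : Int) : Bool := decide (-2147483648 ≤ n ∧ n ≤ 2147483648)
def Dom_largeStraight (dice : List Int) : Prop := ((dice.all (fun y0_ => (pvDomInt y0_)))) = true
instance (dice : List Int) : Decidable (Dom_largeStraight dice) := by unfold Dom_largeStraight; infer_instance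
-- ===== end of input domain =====

-- ===== PORT A =====
-- B replaces A's loop/accumulator by a closed-form membership test (simpler).
def largeStraightLoop (dice : List Int) (fuel : Nat) (num : List Int) (i : Int) : Int :=
  match fuel with
  | 0 => num.sum
  | k + 1 =>
    if dice.contains i ∧ i ≤ 6 then
      largeStraightLoop dice k (num ++ [i]) (i + 1)
    else if num.length < 5 then 0
    else largeStraightLoop dice k num i

def largeStraight (dice : List Int) : Int :=
  largeStraightLoop dice (dice.length + 1) [] 2

-- ===== PORT B =====
def largeStraight_alt (dice : List Int) : Int :=
  if ([2, 3, 4, 5, 6] : List Int).all (fun n => dice.contains n) then 20 else 0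

-- ===== PRECONDITION & SPEC =====
def Spec_largeStraight (dice : List Int) (out : Int) : Prop := out = largeStraight_alt dice
instance (dice : List Int) (out : Int) : Decidable (Spec_largeStraight dice out) := by unfold Spec_largeStraight; infer_instance

-- ===== CLAIM (what is proved, stated in full; the proofs are below) =====
def Claim_equal_largeStraight : Prop := ∀ (dice : List Int), Dom_largeStraight dice → Spec_largeStraight dice (largeStraight dice)

-- ===== LEMMAS AND PROOFS =====

-- once num = [2,3,4,5,6] and i = 7, every remaining iteration is a no-op and the loop returns sum = 20
lemma loop_stall (dice : List Int) (k : Nat) :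
    largeStraightLoop dice k [2, 3, 4, 5, 6] 7 = 20 := by
  induction k with
  | zero => simp [largeStraightLoop]
  | succ k ih =>
    simp only [largeStraightLoop]
    rw [if_neg (by simp), if_neg (by simp)]
    exact ih

-- a duplicate-free list of values all occurring in dice is no longer than dice
lemma len_ge_sub (dice : List Int) (l : List Int) (hnd : l.Nodup)
    (hsub : ∀ x ∈ l, x ∈ dice) : l.length ≤ dice.length := by
  have h : l.toFinset.card ≤ dice.toFinset.card := by
    apply Finset.card_le_card
    intro x hx
    simp only [List.mem_toFinset] at *
    exact hsub x hx
  calc l.length = l.toFinset.card := (List.toFinset_card_of_nodup hnd).symm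
    _ ≤ dice.toFinset.card := h
    _ ≤ dice.length := dice.toFinset_card_le

-- ===== VERDICT (by name: the statement is the Claim_ definition above) =====
theorem largeStraight_spec : Claim_equal_largeStraight := by
  intro dice _
  unfold Spec_largeStraight largeStraight largeStraight_alt
  by_cases c2 : (2 : Int) ∈ dice
  case neg =>
    obtain ⟨k, hk⟩ : ∃ k, dice.length + 1 = k + 1 := ⟨dice.length, rfl⟩
    rw [hk]; simp [largeStraightLoop, c2]
  case pos =>
  by_cases c3 : (3 : Int) ∈ dice
  case neg =>
    have hl : 1 ≤ dice.length := len_ge_sub dice [2] (by decide) (by simp_all)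
    obtain ⟨k, hk⟩ : ∃ k, dice.length + 1 = k + 2 := ⟨dice.length - 1, by omega⟩
    rw [hk]; simp [largeStraightLoop, c2, c3]
  case pos =>
  by_cases c4 : (4 : Int) ∈ dice
  case neg =>
    have hl : 2 ≤ dice.length := len_ge_sub dice [2, 3] (by decide) (by simp_all)
    obtain ⟨k, hk⟩ : ∃ k, dice.length + 1 = k + 3 := ⟨dice.length - 2, by omega⟩
    rw [hk]; simp [largeStraightLoop, c2, c3, c4]
  case pos =>
  by_cases c5 : (5 : Int) ∈ dice
  case neg =>
    have hl : 3 ≤ dice.length := len_ge_sub dice [2, 3, 4] (by decide) (by simp_all)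
    obtain ⟨k, hk⟩ : ∃ k, dice.length + 1 = k + 4 := ⟨dice.length - 3, by omega⟩
    rw [hk]; simp [largeStraightLoop, c2, c3, c4, c5]
  case pos =>
  by_cases c6 : (6 : Int) ∈ dice
  case neg =>
    have hl : 4 ≤ dice.length := len_ge_sub dice [2, 3, 4, 5] (by decide) (by simp_all)
    obtain ⟨k, hk⟩ : ∃ k, dice.length + 1 = k + 5 := ⟨dice.length - 4, by omega⟩
    rw [hk]; simp [largeStraightLoop, c2, c3, c4, c5, c6]
  case pos =>
    have hl : 5 ≤ dice.length := len_ge_sub dice [2, 3, 4, 5, 6] (by decide) (by simp_all)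
    obtain ⟨k, hk⟩ : ∃ k, dice.length + 1 = k + 6 := ⟨dice.length - 5, by omega⟩
    rw [hk]; simp [largeStraightLoop, loop_stall, c2, c3, c4, c5, c6]
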